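-- pv_equiv track=rewrite | github.com/igotyabingo/codingtest | Python3/프로그래머스/1/176963. 추억 점수/추억 점수.py | solution
-- ===== SOURCE A (Python) =====
-- def solution(name, yearning, photo):
--     answer = []
--
--     # 사람 이름을 key로 하고 해당 사람의 그리움 점수를 value로 가지는 dictionary를 생성한다.
--     dic = {}
--     for i in range(len(name)):
--         dic[name[i]] =  yearning[i]
--
--     # 각 photo마다 그리움 점수를 계산하여 answer에 순서대로 추가한다.
--     for p in photo:
--         a = 0
--         for j in p:
--             if j in dic:
--                 a += dic[j]
--         answer.append(a)
--
--     return answer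
-- ===== SOURCE B (Python) =====
-- def solution(name, yearning, photo):
--     # name->yearning map (last wins on duplicate names, like repeated dict assignment)
--     score = dict(zip(name, yearning))
--     answer = []
--     for p in photo:
--         # multiplicity table of the photo, then drive the sum over the known people
--         cnt = {}
--         for person in p:
--             cnt[person] = cnt.get(person, 0) + 1
--         answer.append(sum(v * cnt.get(k, 0) for k, v in score.items()))
--     return answer
-- ===== Notes on version B (the rewrite author's own statement) =====
-- stated objective: alternative
-- what changed: B builds the dict from zip(name, yearning) and scores each photo by first counting it into a multiplicity table and then summing yearning*count over the dict's items, instead of testing membership per photo entry.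
import Mathlib
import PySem

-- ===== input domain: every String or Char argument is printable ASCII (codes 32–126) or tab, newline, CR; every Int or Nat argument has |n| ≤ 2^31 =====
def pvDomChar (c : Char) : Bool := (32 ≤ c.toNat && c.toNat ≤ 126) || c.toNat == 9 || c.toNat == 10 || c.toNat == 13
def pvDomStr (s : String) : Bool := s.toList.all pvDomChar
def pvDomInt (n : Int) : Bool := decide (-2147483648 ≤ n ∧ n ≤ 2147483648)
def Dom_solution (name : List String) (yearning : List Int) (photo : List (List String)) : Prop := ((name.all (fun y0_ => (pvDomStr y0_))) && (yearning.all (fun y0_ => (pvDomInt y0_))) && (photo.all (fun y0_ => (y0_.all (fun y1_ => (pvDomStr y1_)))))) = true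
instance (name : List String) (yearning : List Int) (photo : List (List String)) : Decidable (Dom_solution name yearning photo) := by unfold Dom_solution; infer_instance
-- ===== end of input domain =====

-- B scores each photo by counting it into a multiplicity table and summing yearning*count
-- over the dict's items (instead of a membership test per photo entry); same return values on Pre_.

-- ===== PORT A =====
def solution (name : List String) (yearning : List Int) (photo : List (List String)) : List Int :=
  -- dic = {}; for i in range(len(name)): dic[name[i]] = yearning[i]
  let dic := (PySem.List.pyRange 0 name.length 1).foldl
    (fun d i => d.insert (PySem.List.pyGetD name i "") (PySem.List.pyGetD yearning i 0))
    PySem.Dict.empty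
  -- for p in photo: a = 0; for j in p: if j in dic: a += dic[j]; answer.append(a)
  photo.foldl
    (fun answer p =>
      answer ++ [p.foldl (fun a j => if dic.contains j then a + dic.getD j 0 else a) 0])
    []

-- ===== PORT B =====
def solution_alt (name : List String) (yearning : List Int) (photo : List (List String)) : List Int :=
  -- score = dict(zip(name, yearning))
  let score := (name.zip yearning).foldl (fun d kv => d.insert kv.1 kv.2) PySem.Dict.empty
  photo.foldl
    (fun answer p =>
      -- cnt = {}; for person in p: cnt[person] = cnt.get(person, 0) + 1
      let cnt := p.foldl (fun c person => c.insert person (c.getD person 0 + 1)) PySem.Dict.empty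
      -- sum(v * cnt.get(k, 0) for k, v in score.items())
      answer ++ [(score.items.map (fun kv => kv.2 * cnt.getD kv.1 0)).sum])
    []

-- ===== PRECONDITION & SPEC =====
-- Pre_ excludes exactly the inputs where A raises IndexError (yearning shorter than name).
def Pre_solution (name : List String) (yearning : List Int) (photo : List (List String)) : Prop :=
  name.length ≤ yearning.length
instance (name : List String) (yearning : List Int) (photo : List (List String)) : Decidable (Pre_solution name yearning photo) := by unfold Pre_solution; infer_instance

def pvWitness_solution : List String × List Int × List (List String) :=
  (["kali", "eden"], [10, 30], [["kali", "eden"], ["eden"]])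

def Spec_solution (name : List String) (yearning : List Int) (photo : List (List String)) (out : List Int) : Prop := out = solution_alt name yearning photo
instance (name : List String) (yearning : List Int) (photo : List (List String)) (out : List Int) : Decidable (Spec_solution name yearning photo out) := by unfold Spec_solution; infer_instance

-- ===== CLAIM (what is proved, stated in full; the proofs are below) =====
def Claim_equal_solution : Prop := ∀ (name : List String) (yearning : List Int) (photo : List (List String)), Dom_solution name yearning photo → Pre_solution name yearning photo → Spec_solution name yearning photo (solution name yearning photo)

-- ===== LEMMAS AND PROOFS =====

-- A 0/1-selector sum over a list of distinct keys picks out the matching key's value.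
lemma sum_ite_nodup (ks : List String) (f : String → Int) (j : String) (h : ks.Nodup) :
    (ks.map (fun k => f k * (if k = j then 1 else 0))).sum = if j ∈ ks then f j else 0 := by
  induction ks with
  | nil => simp
  | cons k ks ih =>
    rcases List.nodup_cons.mp h with ⟨hk, hnd⟩
    simp only [List.map_cons, List.sum_cons]
    rw [ih hnd]
    by_cases hkj : j = k
    · subst hkj
      simp [hk]
    · simp [List.mem_cons, hkj, Ne.symm hkj]

-- B's items×count sum equals A's membership-filtered accumulation, for any dict with distinct keys.
lemma photo_score (d : PySem.Dict String Int) (hnd : d.keys.Nodup) (p : List String) (a : Int) :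
    p.foldl (fun a j => if d.contains j then a + d.getD j 0 else a) a
    = a + (d.items.map (fun kv => kv.2 * ((p.count kv.1 : Nat) : Int))).sum := by
  induction p generalizing a with
  | nil => simp
  | cons j p ih =>
    simp only [List.foldl_cons, ih]
    have hitems := PySem.Dict.items_eq_map_keys d hnd (0 : Int)
    have hcount : ∀ kv : String × Int, (((j :: p).count kv.1 : Nat) : Int)
        = ((p.count kv.1 : Nat) : Int) + (if kv.1 = j then 1 else 0) := by
      intro kv
      by_cases hx : kv.1 = j
      · simp [hx]
      · simp [hx, Ne.symm hx]
    calc (if d.contains j then a + d.getD j 0 else a)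
          + (d.items.map (fun kv => kv.2 * ((p.count kv.1 : Nat) : Int))).sum
        = a + ((if d.contains j then d.getD j 0 else 0)
            + (d.items.map (fun kv => kv.2 * ((p.count kv.1 : Nat) : Int))).sum) := by
          split_ifs <;> ring
      _ = a + ((d.items.map (fun kv => kv.2 * (if kv.1 = j then 1 else 0))).sum
            + (d.items.map (fun kv => kv.2 * ((p.count kv.1 : Nat) : Int))).sum) := by
          congr 2
          rw [hitems]
          simp only [List.map_map, Function.comp_def]
          rw [sum_ite_nodup d.keys (fun k => d.getD k 0) j hnd,
              PySem.Dict.contains_eq_decide_mem_keys]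
          split_ifs with hmem <;> simp_all
      _ = a + (d.items.map (fun kv => kv.2 * (((j :: p).count kv.1 : Nat) : Int))).sum := by
          congr 1
          have : (d.items.map (fun kv => kv.2 * (((j :: p).count kv.1 : Nat) : Int)))
              = d.items.map (fun kv => kv.2 * ((p.count kv.1 : Nat) : Int)
                  + kv.2 * (if kv.1 = j then 1 else 0)) := by
            apply List.map_congr_left
            intro kv _
            rw [hcount kv]; ring
          rw [this, PySem.List.sum_map_add_int]
          ring

-- A's index loop over range(len(name)) builds the same dict as B's fold over zip(name, yearning).
lemma dict_eq_zip (name : List String) (yearning : List Int)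
    (h : name.length ≤ yearning.length) (init : PySem.Dict String Int) :
    (PySem.List.pyRange 0 name.length 1).foldl
      (fun d i => d.insert (PySem.List.pyGetD name i "") (PySem.List.pyGetD yearning i 0)) init
    = (name.zip yearning).foldl (fun d kv => d.insert kv.1 kv.2) init := by
  have key : ∀ n : Nat, n ≤ name.length →
      (PySem.List.pyRange 0 n 1).foldl
        (fun d i => d.insert (PySem.List.pyGetD name i "") (PySem.List.pyGetD yearning i 0)) init
      = ((name.zip yearning).take n).foldl (fun d kv => d.insert kv.1 kv.2) init := by
    intro n hn
    induction n with
    | zero => simp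
    | succ m ih =>
      have hm : m ≤ name.length := Nat.le_of_succ_le hn
      have hmlt : m < name.length := hn
      have hzlt : m < (name.zip yearning).length := by
        simp [List.length_zip]; omega
      have hr : PySem.List.pyRange 0 ((m : Int) + 1) 1
          = PySem.List.pyRange 0 (m : Int) 1 ++ [(m : Int)] :=
        PySem.List.pyRange_one_succ_right (by positivity)
      have hcast : ((m + 1 : Nat) : Int) = (m : Int) + 1 := by push_cast; ring
      rw [hcast, hr, List.foldl_append, ih hm, List.take_add_one]
      rw [List.getElem?_eq_getElem hzlt]
      simp only [Option.toList_some, List.foldl_append, List.foldl_cons, List.foldl_nil]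
      rw [PySem.List.pyGetD_ofNat name m "" hmlt,
          PySem.List.pyGetD_ofNat yearning m 0 (by omega)]
      rw [List.getElem_zip]
  have := key name.length le_rfl
  rwa [List.take_of_length_le (by simp [List.length_zip])] at this

-- ===== VERDICT (by name: the statement is the Claim_ definition above) =====
theorem solution_spec : Claim_equal_solution := by
  intro name yearning photo _ hpre
  unfold Spec_solution
  simp only [solution, solution_alt]
  rw [dict_eq_zip name yearning hpre]
  set d := (name.zip yearning).foldl (fun d kv => d.insert kv.1 kv.2) PySem.Dict.empty with hd
  have hnd : d.keys.Nodup :=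
    PySem.Dict.nodup_keys_foldl_insert_key (name.zip yearning) (·.1) (fun _ kv => kv.2)
      PySem.Dict.empty PySem.Dict.nodup_keys_empty
  congr 1
  funext answer p
  congr 2
  rw [photo_score d hnd p 0]
  simp only [zero_add]
  congr 1
  apply List.map_congr_left
  intro kv _
  rw [PySem.Dict.getD_foldl_insert_add_one p PySem.Dict.empty kv.1]
  simp
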